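-- pv_equiv track=rewrite | github.com/annaglyph/qc-asset-tracker | src/qc_asset_crawler/mutation.py | summarize_frame_spans
-- ===== SOURCE A (Python) =====
-- from collections.abc import Mapping, Sequence
--
-- def summarize_frame_spans(frame_ids: Sequence[str]) -> str:
--     """Summarise a list of frame identifiers into compact span notation.
--
--     The input is expected to be sorted in ascending order so that lexicographic
--     order also reflects numeric order (for example zero-padded numbers like
--     "0001", "0002", ...).
--
--     Example
--     -------
--     >>> summarize_frame_spans(["0001", "0002", "0003", "0010"])
--     '0001–0003, 0010'
--     """
--     if not frame_ids:
--         return ""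
--
--     # Convert to numeric for contiguity checks but keep original strings.
--     parsed: list[tuple[int | None, str]] = []
--     for fid in frame_ids:
--         try:
--             n = int(fid)
--         except ValueError:
--             n = None
--         parsed.append((n, fid))
--
--     spans: list[str] = []
--     i = 0
--
--     while i < len(parsed):
--         n, label = parsed[i]
--
--         # Non-numeric identifiers: each gets its own span.
--         if n is None:
--             spans.append(label)
--             i += 1
--             continue
--
--         # Start a numeric span.
--         start_label = label
--         end_label = label
--         last_n = n
--
--         j = i + 1
--         while j < len(parsed):
--             n2, label2 = parsed[j]
--             if n2 is None or n2 != last_n + 1: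
--                 break
--             end_label = label2
--             last_n = n2
--             j += 1
--
--         if start_label == end_label:
--             spans.append(start_label)
--         else:
--             spans.append(f"{start_label}–{end_label}")
--
--         i = j
--
--     return ", ".join(spans)
-- ===== SOURCE B (Python) =====
-- def summarize_frame_spans(frame_ids):
--     """Two-pass rewrite: first group consecutive ids, then format each group."""
--     groups = []
--     cur = []
--     prev = None
--     for fid in frame_ids:
--         try:
--             n = int(fid)
--         except ValueError:
--             n = None
--         if cur and n is not None and prev is not None and n == prev + 1:
--             cur.append(fid)
--         else:
--             if cur:
--                 groups.append(cur)
--             cur = [fid]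
--         prev = n
--     if cur:
--         groups.append(cur)
--     parts = [g[0] if len(g) == 1 else f"{g[0]}\u2013{g[-1]}" for g in groups]
--     return ", ".join(parts)
-- ===== Notes on version B (the rewrite author's own statement) =====
-- stated objective: alternative
-- what changed: Replaced A's index-based outer while with a nested inner re-scan (two-pointer span extraction) by a single linear fold that accumulates groups of consecutive ids, followed by a separate formatting pass over the groups.
import Mathlib
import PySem

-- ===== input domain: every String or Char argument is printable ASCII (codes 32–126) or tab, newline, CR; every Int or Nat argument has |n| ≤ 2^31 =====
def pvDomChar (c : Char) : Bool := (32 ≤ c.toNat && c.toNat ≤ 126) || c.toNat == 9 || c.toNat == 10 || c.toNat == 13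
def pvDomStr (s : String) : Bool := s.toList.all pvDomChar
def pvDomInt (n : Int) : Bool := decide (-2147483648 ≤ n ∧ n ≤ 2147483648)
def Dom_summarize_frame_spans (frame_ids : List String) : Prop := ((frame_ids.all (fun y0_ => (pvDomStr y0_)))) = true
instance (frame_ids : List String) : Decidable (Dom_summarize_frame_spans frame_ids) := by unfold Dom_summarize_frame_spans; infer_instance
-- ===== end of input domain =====

-- B replaces A's interleaved two-pointer scan-and-emit by one grouping fold plus a
-- separate formatting pass (objective: alternative decomposition, same cost).

-- ===== PORT A =====
-- inner while over parsed: extend the span while the next id parses to last_n + 1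
def pvScanA : String → Int → List (Option Int × String) → String × Int × List (Option Int × String)
  | e, l, [] => (e, l, [])
  | e, l, (n2, lb2) :: rest =>
    if n2 = some (l + 1) then pvScanA lb2 (l + 1) rest
    else (e, l, (n2, lb2) :: rest)

theorem pvScanA_len (e : String) (l : Int) (xs : List (Option Int × String)) :
    (pvScanA e l xs).2.2.length ≤ xs.length := by
  induction xs generalizing e l with
  | nil => simp [pvScanA]
  | cons x rest ih =>
    obtain ⟨n2, lb2⟩ := x
    by_cases h : n2 = some (l + 1) <;> simp only [pvScanA, h, if_pos] <;> simp
    exact Nat.le_succ_of_le (ih _ _)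

-- outer while over parsed (i jumps to j = position after the span)
def pvALoop : List (Option Int × String) → List String
  | [] => []
  | (none, lb) :: rest => lb :: pvALoop rest
  | (some n, lb) :: rest =>
    (if lb = (pvScanA lb n rest).1 then lb
     else lb ++ "–" ++ (pvScanA lb n rest).1) :: pvALoop (pvScanA lb n rest).2.2
termination_by xs => xs.length
decreasing_by
  all_goals
    simp only [List.length_cons]
    first
      | exact Nat.lt_succ_of_le (pvScanA_len _ _ _)
      | omega

def summarize_frame_spans (frame_ids : List String) : String :=
  if frame_ids = [] then ""
  else
    -- parsed = [(int(fid) or None, fid)]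
    PySem.Str.join ", " (pvALoop (frame_ids.map (fun fid => (PySem.Int.ofStr? fid, fid))))

-- ===== PORT B =====
-- one fold: extend cur when this id parses to prev + 1, otherwise flush cur and start anew
def pvBLoop : List String → List String → Option Int → List (List String) → List (List String)
  | [], cur, _, groups => if cur = [] then groups else groups ++ [cur]
  | fid :: rest, cur, prev, groups =>
    let n := PySem.Int.ofStr? fid
    if cur ≠ [] ∧ n.isSome ∧ prev.isSome ∧ n = prev.map (· + 1) then
      pvBLoop rest (cur ++ [fid]) n groups
    else
      pvBLoop rest [fid] n (if cur = [] then groups else groups ++ [cur])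

-- g[0] / g[-1]; every group is nonempty by construction, the defaults are unreachable
def pvFmt (g : List String) : String :=
  if g.length = 1 then g.headD "" else g.headD "" ++ "–" ++ g.getLastD ""

def summarize_frame_spans_alt (frame_ids : List String) : String :=
  PySem.Str.join ", " ((pvBLoop frame_ids [] none []).map pvFmt)

-- ===== PRECONDITION & SPEC =====
def Spec_summarize_frame_spans (frame_ids : List String) (out : String) : Prop := out = summarize_frame_spans_alt frame_ids
instance (frame_ids : List String) (out : String) : Decidable (Spec_summarize_frame_spans frame_ids out) := by unfold Spec_summarize_frame_spans; infer_instance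

-- ===== CLAIM (what is proved, stated in full; the proofs are below) =====
def Claim_equal_summarize_frame_spans : Prop := ∀ (frame_ids : List String), Dom_summarize_frame_spans frame_ids → Spec_summarize_frame_spans frame_ids (summarize_frame_spans frame_ids)

-- ===== LEMMAS AND PROOFS =====

-- the run of consecutive successors of l at the head of xs, and the remainder
def pvSplitRun : Int → List String → List String × List String
  | _, [] => ([], [])
  | l, f :: rest =>
    if PySem.Int.ofStr? f = some (l + 1) then
      ((f :: (pvSplitRun (l + 1) rest).1), (pvSplitRun (l + 1) rest).2)
    else ([], f :: rest)

theorem pvSplitRun_len (l : Int) (xs : List String) :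
    (pvSplitRun l xs).2.length ≤ xs.length := by
  induction xs generalizing l with
  | nil => simp [pvSplitRun]
  | cons f rest ih =>
    by_cases h : PySem.Int.ofStr? f = some (l + 1) <;>
      simp only [pvSplitRun, h, if_pos] <;> simp
    exact Nat.le_succ_of_le (ih _)

-- reference grouping both ports are reduced to
def pvGroups : List String → List (List String)
  | [] => []
  | f :: rest =>
    match PySem.Int.ofStr? f with
    | none => [f] :: pvGroups rest
    | some n => (f :: (pvSplitRun n rest).1) :: pvGroups (pvSplitRun n rest).2
termination_by xs => xs.length
decreasing_by
  all_goals
    simp only [List.length_cons]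
    first
      | exact Nat.lt_succ_of_le (pvSplitRun_len _ _)
      | omega

@[simp] theorem pvGroups_nil : pvGroups [] = [] := by rw [pvGroups]

theorem pvGroups_none (f : String) (rest : List String) (hf : PySem.Int.ofStr? f = none) :
    pvGroups (f :: rest) = [f] :: pvGroups rest := by rw [pvGroups, hf]

theorem pvGroups_some (f : String) (rest : List String) (n : Int)
    (hf : PySem.Int.ofStr? f = some n) :
    pvGroups (f :: rest) =
      (f :: (pvSplitRun n rest).1) :: pvGroups (pvSplitRun n rest).2 := by rw [pvGroups, hf]

@[simp] theorem pvALoop_nil : pvALoop [] = [] := by rw [pvALoop]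

theorem pvALoop_none (lb : String) (rest : List (Option Int × String)) :
    pvALoop ((none, lb) :: rest) = lb :: pvALoop rest := by rw [pvALoop]

theorem pvALoop_some (n : Int) (lb : String) (rest : List (Option Int × String)) :
    pvALoop ((some n, lb) :: rest) =
      (if lb = (pvScanA lb n rest).1 then lb
       else lb ++ "–" ++ (pvScanA lb n rest).1) :: pvALoop (pvScanA lb n rest).2.2 := by
  rw [pvALoop]

theorem pvScanA_eq_splitRun (xs : List String) (e : String) (l : Int) :
    pvScanA e l (xs.map (fun fid => (PySem.Int.ofStr? fid, fid))) =
      ((pvSplitRun l xs).1.foldl (fun _ b => b) e, l + (pvSplitRun l xs).1.length,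
        (pvSplitRun l xs).2.map (fun fid => (PySem.Int.ofStr? fid, fid))) := by
  induction xs generalizing e l with
  | nil => simp [pvScanA, pvSplitRun]
  | cons f rest ih =>
    by_cases h : PySem.Int.ofStr? f = some (l + 1)
    · simp only [List.map_cons, pvScanA, pvSplitRun, h, if_pos, ih]
      simp
      omega
    · simp [pvScanA, pvSplitRun, h]

theorem pvSplitRun_mem_gt (xs : List String) (l : Int) (s : String)
    (hs : s ∈ (pvSplitRun l xs).1) : ∃ m, PySem.Int.ofStr? s = some m ∧ l < m := by
  induction xs generalizing l with
  | nil => simp [pvSplitRun] at hs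
  | cons f rest ih =>
    by_cases h : PySem.Int.ofStr? f = some (l + 1)
    · simp only [pvSplitRun, h, if_pos, List.mem_cons] at hs
      rcases hs with rfl | hs
      · exact ⟨l + 1, h, by omega⟩
      · obtain ⟨m, hm, hlt⟩ := ih (l + 1) hs
        exact ⟨m, hm, by omega⟩
    · simp [pvSplitRun, h] at hs

theorem pvFoldl_last_mem {α : Type} (run : List α) (e : α) (h : run ≠ []) :
    run.foldl (fun _ b => b) e ∈ run := by
  induction run generalizing e with
  | nil => exact absurd rfl h
  | cons a t ih =>
    by_cases ht : t = []
    · subst ht; simp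
    · exact List.mem_cons_of_mem a (by simpa using ih a ht)

theorem pvGetLast?_eq_foldl (run : List String) (lb : String) :
    (lb :: run).getLast? = some (run.foldl (fun _ b => b) lb) := by
  induction run generalizing lb with
  | nil => simp
  | cons a t ih => simpa using ih a

theorem pvALoop_eq_groups (xs : List String) :
    pvALoop (xs.map (fun fid => (PySem.Int.ofStr? fid, fid))) = (pvGroups xs).map pvFmt := by
  generalize hn : xs.length = N
  induction N using Nat.strong_induction_on generalizing xs with
  | _ N ih =>
  cases xs with
  | nil => simp
  | cons f rest =>
    cases hf : PySem.Int.ofStr? f with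
    | none =>
      have hN : rest.length < N := by rw [← hn]; simp
      rw [List.map_cons, hf, pvALoop_none, pvGroups_none f rest hf, List.map_cons,
        ih rest.length hN rest rfl]
      simp [pvFmt]
    | some n =>
      have hN : (pvSplitRun n rest).2.length < N := by
        have := pvSplitRun_len n rest
        rw [← hn]; simp; omega
      rw [List.map_cons, hf, pvALoop_some, pvGroups_some f rest n hf, List.map_cons,
        pvScanA_eq_splitRun rest f n, ih (pvSplitRun n rest).2.length hN _ rfl]
      congr 1
      by_cases hrun : (pvSplitRun n rest).1 = []
      · simp [hrun, pvFmt]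
      · have hmem := pvFoldl_last_mem (pvSplitRun n rest).1 f hrun
        obtain ⟨m, hm, hlt⟩ := pvSplitRun_mem_gt rest n _ hmem
        have hne : f ≠ (pvSplitRun n rest).1.foldl (fun _ b => b) f := by
          intro hEq
          rw [← hEq, hf] at hm
          simp at hm
          omega
        rw [if_neg hne]
        simp [pvFmt, hrun, pvGetLast?_eq_foldl]

-- the two pvBLoop invariants, packaged for one induction on a length bound
theorem pvBLoop_invariants (N : Nat) : ∀ (xs : List String), xs.length ≤ N →
    (∀ (p : Int) (cur : List String) (groups : List (List String)), cur ≠ [] →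
        pvBLoop xs cur (some p) groups =
          groups ++ [cur ++ (pvSplitRun p xs).1] ++ pvGroups (pvSplitRun p xs).2) ∧
    (∀ (f : String) (groups : List (List String)),
        pvBLoop xs [f] (PySem.Int.ofStr? f) groups = groups ++ pvGroups (f :: xs)) := by
  induction N with
  | zero =>
    intro xs hxs
    have hx : xs = [] := by simpa using List.eq_nil_of_length_eq_zero (Nat.le_zero.mp hxs)
    subst hx
    constructor
    · intro p cur groups hcur
      simp [pvBLoop, pvSplitRun, hcur]
    · intro f groups
      cases hf : PySem.Int.ofStr? f with
      | none => simp [pvBLoop, pvGroups_none f [] hf]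
      | some n => simp [pvBLoop, pvGroups_some f [] n hf, pvSplitRun]
  | succ N ihN =>
    intro xs hxs
    cases xs with
    | nil =>
      constructor
      · intro p cur groups hcur
        simp [pvBLoop, pvSplitRun, hcur]
      · intro f groups
        cases hf : PySem.Int.ofStr? f with
        | none => simp [pvBLoop, pvGroups_none f [] hf]
        | some n => simp [pvBLoop, pvGroups_some f [] n hf, pvSplitRun]
    | cons f rest =>
      have hrest : rest.length ≤ N := by simpa using hxs
      have hP2 : ∀ (p : Int) (cur : List String) (groups : List (List String)), cur ≠ [] →
          pvBLoop (f :: rest) cur (some p) groups =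
            groups ++ [cur ++ (pvSplitRun p (f :: rest)).1] ++ pvGroups (pvSplitRun p (f :: rest)).2 := by
        intro p cur groups hcur
        by_cases h : PySem.Int.ofStr? f = some (p + 1)
        · have hcond : cur ≠ [] ∧ (PySem.Int.ofStr? f).isSome ∧ (some p : Option Int).isSome ∧
              PySem.Int.ofStr? f = (some p : Option Int).map (· + 1) := by
            refine ⟨hcur, by simp [h], by simp, by simpa using h⟩
          simp only [pvBLoop, if_pos hcond]
          rw [h, (ihN rest hrest).1 (p + 1) (cur ++ [f]) groups (by simp)]
          simp only [pvSplitRun, h, if_pos]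
          simp
        · have hcond : ¬(cur ≠ [] ∧ (PySem.Int.ofStr? f).isSome ∧ (some p : Option Int).isSome ∧
              PySem.Int.ofStr? f = (some p : Option Int).map (· + 1)) := by
            intro hc
            exact h (by simpa using hc.2.2.2)
          simp only [pvBLoop, if_neg hcond, if_neg hcur]
          rw [(ihN rest hrest).2 f (groups ++ [cur])]
          simp only [pvSplitRun, h, ite_false]
          simp
      refine ⟨hP2, ?_⟩
      intro g groups
      cases hg : PySem.Int.ofStr? g with
      | some n =>
        rw [hP2 n [g] groups (by simp), pvGroups_some g (f :: rest) n hg]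
        simp
      | none =>
        have hcond : ¬(([g] : List String) ≠ [] ∧ (PySem.Int.ofStr? f).isSome ∧
            (none : Option Int).isSome ∧ PySem.Int.ofStr? f = (none : Option Int).map (· + 1)) := by
          intro hc
          simpa using hc.2.2.1
        simp only [pvBLoop, if_neg hcond, if_neg (by simp : ¬([g] : List String) = [])]
        rw [(ihN rest hrest).2 f (groups ++ [[g]]), pvGroups_none g (f :: rest) hg]
        simp
      
theorem pvBLoop_main (xs : List String) : pvBLoop xs [] none [] = pvGroups xs := by
  cases xs with
  | nil => simp [pvBLoop]
  | cons f rest =>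
    have step : pvBLoop (f :: rest) [] none [] = pvBLoop rest [f] (PySem.Int.ofStr? f) [] := by
      simp [pvBLoop]
    rw [step, (pvBLoop_invariants rest.length rest le_rfl).2 f []]
    simp

-- ===== VERDICT (by name: the statement is the Claim_ definition above) =====
theorem summarize_frame_spans_spec : Claim_equal_summarize_frame_spans := by
  intro xs _
  unfold Spec_summarize_frame_spans summarize_frame_spans summarize_frame_spans_alt
  rw [pvBLoop_main]
  by_cases hxs : xs = []
  · subst hxs
    simp
    rfl
  · rw [if_neg hxs, pvALoop_eq_groups]
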